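-- pv_equiv track=rewrite | github.com/Gyoung-0/Baek | 프로그래머스/2/340212. ［PCCP 기출문제］ 2번 ／ 퍼즐 게임 챌린지/［PCCP 기출문제］ 2번 ／ 퍼즐 게임 챌린지.py | solution
-- ===== SOURCE A (Python) =====
-- def solution(diffs, times, limit):
--     # 퍼즐의 난이도= diff, 현재 퍼즐의 소요시간 = time_cur, 이전 퍼즐 소요시간 = time_prev, 숙련도=level
--     # diff <= level -> time_cur 만큼 사용해 해결
--     # diff > level -> diff - level 번 틀림 (틀릴때마다 time_cur만큼 시간 사용),
--     #   추가로 time_prev만큼 시간 사용해 이전 퍼즐 다시 품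
--     #   이전 퍼즐을 풀때는 난이도 상관없이 틀리지 않음 (diff-level번 틀린 이후 풀면 time_cur만큼의 시간 사용해 해결)
--
--     # 1부터 시작해 limit의 최댓값이 넘어가기 전 값을 result로 하면 그때 시간복잡도는?
--     # diff 최댓값부터 시작헤 1씩 줄여가면서  limit이 최대인값 찾으면 그때 시간복잡도는?
--     n = len(diffs)
--     # divide and conquer로 해결
--     def can_clear(level):
--         prev_time = 0
--         total_time = 0
--
--         for i in range(n):
--             diff = diffs[i]
--             time_cur = times[i]
--
--             if diff <= level:
--                 total_time += time_cur
--             else: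
--                 if i == 0:
--                     total_time += time_cur
--                 else:
--                     total_time += (diff-level) * (time_cur + prev_time) + time_cur
--
--             if total_time > limit:
--                 return False
--
--             prev_time = time_cur
--         return True
--
--     left, right = 1, max(diffs)
--     answer = right
--
--     while left <= right:
--         mid = (left + right) // 2
--         if can_clear(mid):
--             answer = mid
--             right = mid -1
--         else:
--             left = mid + 1
--     return answer
-- ===== SOURCE B (Python) =====
-- def solution(diffs, times, limit):
--     # Closed-form total time f(level) is piecewise linear and non-increasing in level;
--     # walk its breakpoints (sorted descending) and solve for the minimal feasible level
--     # arithmetically instead of binary-searching with repeated O(n) feasibility scans.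
--     n = len(diffs)
--     M = max(diffs)
--     total = sum(times[:n])          # f(M): at level M every puzzle is solved first try
--     if M < 1 or total > limit:
--         return M
--     pairs = sorted(((diffs[i], times[i] + times[i - 1]) for i in range(1, n)),
--                    key=lambda p: p[0], reverse=True)   # (breakpoint, per-retry cost), descending
--     cur = M        # current level; invariant: f(cur) = total <= limit
--     slope = 0      # sum of retry costs w for breakpoints b >= cur
--     k = 0
--     while cur > 1:
--         while k < len(pairs) and pairs[k][0] >= cur:
--             slope += pairs[k][1]
--             k += 1
--         nxt = pairs[k][0] if k < len(pairs) and pairs[k][0] > 1 else 1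
--         # on [nxt, cur]: f(L) = total + (cur - L) * slope
--         if slope > 0:
--             t = cur - (limit - total) // slope
--             if t > nxt:
--                 return t           # minimal feasible level, found in this segment
--         total += (cur - nxt) * slope
--         cur = nxt
--     return 1
-- ===== Notes on version B (the rewrite author's own statement) =====
-- stated objective: faster
-- what changed: Replaces the binary search over skill levels (each probe an O(n) feasibility scan) by a single closed-form pass: the total time is piecewise linear and non-increasing in the level, so B sorts the (difficulty, retry-cost) breakpoints once, walks the segments, and solves for the minimal feasible level arithmetically.
-- outside the precondition, e.g. on solution([1, 7, 6, 5], [3, -2, -5, -1], 0): A returns 7, B returns 1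
import Mathlib
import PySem

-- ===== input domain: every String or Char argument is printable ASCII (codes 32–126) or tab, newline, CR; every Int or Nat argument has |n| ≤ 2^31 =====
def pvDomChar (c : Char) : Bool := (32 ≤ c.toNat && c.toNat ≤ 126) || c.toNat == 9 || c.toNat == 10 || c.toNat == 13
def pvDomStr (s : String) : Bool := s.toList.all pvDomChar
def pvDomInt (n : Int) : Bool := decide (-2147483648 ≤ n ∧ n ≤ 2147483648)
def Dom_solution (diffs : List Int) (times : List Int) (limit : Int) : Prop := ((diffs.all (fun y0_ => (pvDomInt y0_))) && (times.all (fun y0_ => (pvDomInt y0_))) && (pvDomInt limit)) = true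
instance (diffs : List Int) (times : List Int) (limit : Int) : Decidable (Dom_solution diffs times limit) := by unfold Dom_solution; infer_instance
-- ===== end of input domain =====

-- B replaces A's binary search over levels by one sorted closed-form segment walk; proved equal on Pre_.

-- ===== PORT A =====
-- can_clear's loop 'for i in range(n)', state (prev_time, total_time); early 'return False' kept.
-- fuel only makes the recursion structural: it is called with fuel = n - i, exactly the remaining iterations.
-- times[i] is PySem.List.pyGet? (IndexError = none, excluded by Pre_); .getD 0 only totalises the port there.
def canClearGo (diffs times : List Int) (limit level : Int) : Nat → Nat → Int → Int → Bool
  | 0, _i, _prev, _tot => true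
  | fuel + 1, i, prev, tot =>
    let d := (PySem.List.pyGet? diffs (i : Int)).getD 0
    let t := (PySem.List.pyGet? times (i : Int)).getD 0
    let tot' := tot + (if d ≤ level then t else (if i = 0 then t else (d - level) * (t + prev) + t))
    if limit < tot' then false
    else canClearGo diffs times limit level fuel (i + 1) t tot'

-- 'while left <= right' of A's binary search; fuel = interval length bounds the iteration count
-- (each step shrinks the interval), so the fuel-0 arm is only reached when left > right: answer.
def bsearchGo (diffs times : List Int) (limit : Int) : Nat → Int → Int → Int → Int
  | 0, _left, _right, answer => answer
  | fuel + 1, left, right, answer =>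
    if left ≤ right then
      let mid := PySem.Int.floordiv (left + right) 2
      if canClearGo diffs times limit mid diffs.length 0 0 0 then
        bsearchGo diffs times limit fuel left (mid - 1) mid
      else
        bsearchGo diffs times limit fuel (mid + 1) right answer
    else answer

def solution (diffs : List Int) (times : List Int) (limit : Int) : Int :=
  let right := (PySem.List.max? diffs (fun x => x)).getD 0   -- max(diffs); none (empty) excluded by Pre_
  bsearchGo diffs times limit right.toNat 1 right right      -- fuel = initial interval length (right + 1 - 1)

-- ===== PORT B =====
-- the generator '((diffs[i], times[i] + times[i-1]) for i in range(1, n))'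
def pairsRaw (diffs times : List Int) : List (Int × Int) :=
  (PySem.List.pyRange 1 (diffs.length : Int) 1).map (fun i =>
    ((PySem.List.pyGet? diffs i).getD 0,
     (PySem.List.pyGet? times i).getD 0 + (PySem.List.pyGet? times (i - 1)).getD 0))

-- inner 'while k < len(pairs) and pairs[k][0] >= cur' absorbing breakpoints into the slope;
-- fuel = pairs.length - k, the maximal number of remaining iterations
def absorbGo (pairs : List (Int × Int)) (cur : Int) : Nat → Nat → Int → Nat × Int
  | 0, k, slope => (k, slope)
  | fuel + 1, k, slope =>
    if h : k < pairs.length then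
      if cur ≤ pairs[k].1 then absorbGo pairs cur fuel (k + 1) (slope + pairs[k].2) else (k, slope)
    else (k, slope)

-- outer 'while cur > 1' segment walk; cur strictly decreases each iteration, so fuel = cur - 1
-- bounds the iteration count and the fuel-0 arm is only reached at cur = 1, where the loop exits: 1.
def walkGo (pairs : List (Int × Int)) (limit : Int) : Nat → Int → Int → Int → Nat → Int
  | 0, _cur, _total, _slope, _k => 1
  | fuel + 1, cur, total, slope, k =>
    if 1 < cur then
      let a := absorbGo pairs cur (pairs.length - k) k slope
      let k' := a.1
      let slope' := a.2
      let nxt := if h2 : k' < pairs.length then (if 1 < pairs[k'].1 then pairs[k'].1 else 1) else 1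
      let t := cur - PySem.Int.floordiv (limit - total) slope'
      if 0 < slope' ∧ nxt < t then t
      else walkGo pairs limit fuel nxt (total + (cur - nxt) * slope') slope' k'
    else 1

def solution_alt (diffs : List Int) (times : List Int) (limit : Int) : Int :=
  let n := diffs.length
  let M := (PySem.List.max? diffs (fun x => x)).getD 0        -- max(diffs)
  let total := (PySem.List.slice times none (some (n : Int))).sum   -- sum(times[:n])
  if M < 1 ∨ limit < total then M
  else walkGo (PySem.List.sorted (pairsRaw diffs times) (fun p => p.1) true) limit
    (M - 1).toNat M total 0 0

-- ===== PRECONDITION & SPEC =====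
-- Pre_ excludes (a) empty diffs and times shorter than diffs, where A raises (ValueError/IndexError),
-- and (b) inputs with a negative time among the first len(diffs) entries: solving times are naturally
-- non-negative, and on negative ones the feasibility predicate is non-monotone, so A's binary-search
-- value is an accident of probe order while B returns the piecewise-linear threshold — a corner no
-- specification fixes either way.
def Pre_solution (diffs : List Int) (times : List Int) (limit : Int) : Prop :=
  diffs ≠ [] ∧ diffs.length ≤ times.length ∧ ∀ t ∈ times.take diffs.length, 0 ≤ t
instance (diffs : List Int) (times : List Int) (limit : Int) : Decidable (Pre_solution diffs times limit) := by
  unfold Pre_solution; infer_instance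

def pvWitness_solution : List Int × List Int × Int := ([1, 3, 2], [2, 5, 1], 20)

def Spec_solution (diffs : List Int) (times : List Int) (limit : Int) (out : Int) : Prop := out = solution_alt diffs times limit
instance (diffs : List Int) (times : List Int) (limit : Int) (out : Int) : Decidable (Spec_solution diffs times limit out) := by unfold Spec_solution; infer_instance

-- ===== CLAIM (what is proved, stated in full; the proofs are below) =====
def Claim_equal_solution : Prop := ∀ (diffs : List Int) (times : List Int) (limit : Int), Dom_solution diffs times limit → Pre_solution diffs times limit → Spec_solution diffs times limit (solution diffs times limit)

-- ===== LEMMAS AND PROOFS =====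

-- spec-level view of can_clear's increments
def tG (times : List Int) (j : Nat) : Int := times.getD j 0

def incF (diffs times : List Int) (L : Int) (j : Nat) : Int :=
  if diffs.getD j 0 ≤ L then tG times j
  else if j = 0 then tG times j
  else (diffs.getD j 0 - L) * (tG times j + tG times (j - 1)) + tG times j

def sufF (diffs times : List Int) (L : Int) (i : Nat) : Int :=
  if i < diffs.length then incF diffs times L i + sufF diffs times L (i + 1) else 0
termination_by diffs.length - i

def hSum (ps : List (Int × Int)) (L : Int) : Int :=
  (ps.map (fun p => max (p.1 - L) 0 * p.2)).sum

theorem hSum_nil (L : Int) : hSum [] L = 0 := rfl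

theorem hSum_cons (p : Int × Int) (ps : List (Int × Int)) (L : Int) :
    hSum (p :: ps) L = max (p.1 - L) 0 * p.2 + hSum ps L := by
  simp [hSum]

theorem hSum_append (xs ys : List (Int × Int)) (L : Int) :
    hSum (xs ++ ys) L = hSum xs L + hSum ys L := by
  simp [hSum]

theorem hSum_perm {ps qs : List (Int × Int)} (h : ps.Perm qs) (L : Int) :
    hSum ps L = hSum qs L := by
  exact (h.map _).sum_eq

theorem hSum_eq_zero {ps : List (Int × Int)} {L : Int} (h : ∀ p ∈ ps, p.1 ≤ L) :
    hSum ps L = 0 := by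
  induction ps with
  | nil => rfl
  | cons p ps ih =>
    have h1 := h p (by simp)
    rw [hSum_cons, ih (fun q hq => h q (by simp [hq]))]
    have : max (p.1 - L) 0 = 0 := by omega
    rw [this]; ring

theorem hSum_antitone {ps : List (Int × Int)} {L L' : Int} (hw : ∀ p ∈ ps, 0 ≤ p.2)
    (h : L ≤ L') : hSum ps L' ≤ hSum ps L := by
  induction ps with
  | nil => simp [hSum_nil]
  | cons p ps ih =>
    rw [hSum_cons, hSum_cons]
    have h2 := hw p (by simp)
    have ht := ih (fun q hq => hw q (by simp [hq]))
    have : max (p.1 - L') 0 * p.2 ≤ max (p.1 - L) 0 * p.2 :=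
      mul_le_mul_of_nonneg_right (by omega) h2
    omega

theorem hSum_shift {xs : List (Int × Int)} {cur L : Int}
    (hcur : ∀ p ∈ xs, cur ≤ p.1) (hL : L ≤ cur) :
    hSum xs L = hSum xs cur + (cur - L) * ((xs.map (·.2)).sum) := by
  induction xs with
  | nil => simp [hSum_nil]
  | cons p ps ih =>
    have h1 := hcur p (by simp)
    rw [hSum_cons, hSum_cons, ih (fun q hq => hcur q (by simp [hq]))]
    have e1 : max (p.1 - L) 0 = p.1 - L := by omega
    have e2 : max (p.1 - cur) 0 = p.1 - cur := by omega
    rw [e1, e2]; simp; ring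

-- ---- A side: can_clear computes the closed-form suffix sum ----

theorem tG_nonneg {diffs times : List Int}
    (hlen : diffs.length ≤ times.length)
    (ht : ∀ t ∈ times.take diffs.length, 0 ≤ t) :
    ∀ i : Nat, i < diffs.length → 0 ≤ tG times i := by
  intro i hi
  have hi' : i < times.length := by omega
  have hlt : i < (times.take diffs.length).length := by
    simp [List.length_take]; omega
  have hmem := List.getElem_mem hlt
  rw [List.getElem_take] at hmem
  have := ht _ hmem
  simpa [tG, List.getD_eq_getElem?_getD, List.getElem?_eq_getElem hi'] using this

theorem incF_nonneg {diffs times : List Int} {L : Int} {j : Nat}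
    (hj : j < diffs.length) (hlen : diffs.length ≤ times.length)
    (ht : ∀ t ∈ times.take diffs.length, 0 ≤ t) :
    0 ≤ incF diffs times L j := by
  have htj := tG_nonneg hlen ht
  unfold incF
  split
  · exact htj j hj
  · split
    · exact htj j hj
    · have h1 := htj j hj
      have h2 := htj (j - 1) (by omega)
      have h3 : 0 ≤ (diffs.getD j 0 - L) * (tG times j + tG times (j - 1)) :=
        mul_nonneg (by omega) (by omega)
      omega

theorem sufF_nonneg {diffs times : List Int} {L : Int}
    (hlen : diffs.length ≤ times.length)
    (ht : ∀ t ∈ times.take diffs.length, 0 ≤ t) :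
    ∀ i, 0 ≤ sufF diffs times L i := by
  intro i
  fun_induction sufF diffs times L i with
  | case1 i hi ih =>
    have := incF_nonneg (L := L) hi hlen ht
    omega
  | case2 i hi => omega

theorem pyGetD_eq_getD (xs : List Int) (i : Nat) :
    (PySem.List.pyGet? xs (i : Int)).getD 0 = xs.getD i 0 := by
  rw [PySem.List.pyGet?_natCast, List.getD_eq_getElem?_getD]

-- the port's increment expression is incF
theorem inc_port_eq {diffs times : List Int} {L prev : Int} {i : Nat}
    (hprev : i ≠ 0 → prev = tG times (i - 1)) :
    (if (PySem.List.pyGet? diffs (i : Int)).getD 0 ≤ L then (PySem.List.pyGet? times (i : Int)).getD 0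
     else if i = 0 then (PySem.List.pyGet? times (i : Int)).getD 0
     else ((PySem.List.pyGet? diffs (i : Int)).getD 0 - L) * ((PySem.List.pyGet? times (i : Int)).getD 0 + prev) + (PySem.List.pyGet? times (i : Int)).getD 0)
      = incF diffs times L i := by
  rw [pyGetD_eq_getD, pyGetD_eq_getD]
  unfold incF tG
  split
  · rfl
  · split
    · rfl
    · rename_i h0
      rw [hprev h0]
      rfl

theorem canClear_eq {diffs times : List Int} {limit L : Int}
    (hlen : diffs.length ≤ times.length)
    (ht : ∀ t ∈ times.take diffs.length, 0 ≤ t) :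
    ∀ fuel i prev tot, i + fuel = diffs.length → i < diffs.length →
      (i ≠ 0 → prev = tG times (i - 1)) →
      canClearGo diffs times limit L fuel i prev tot
        = decide (tot + sufF diffs times L i ≤ limit) := by
  intro fuel
  induction fuel with
  | zero => intro i prev tot hm hi; omega
  | succ mm ih =>
    intro i prev tot hm hi hprev
    simp only [canClearGo]
    rw [inc_port_eq hprev]
    rw [sufF, if_pos hi]
    by_cases hc : limit < tot + incF diffs times L i
    · rw [if_pos hc]
      have hs := sufF_nonneg (L := L) hlen ht (i + 1)
      have hng : ¬ (tot + (incF diffs times L i + sufF diffs times L (i + 1)) ≤ limit) := by omega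
      simp [hng]
    · rw [if_neg hc]
      by_cases hn1 : i + 1 < diffs.length
      · rw [ih (i + 1) _ _ (by omega) hn1 (fun _ => by rw [pyGetD_eq_getD]; simp [tG])]
        simp only [decide_eq_decide]
        omega
      · have hz : mm = 0 := by omega
        subst hz
        have hL : canClearGo diffs times limit L 0 (i + 1)
            ((PySem.List.pyGet? times (i : Int)).getD 0) (tot + incF diffs times L i) = true := rfl
        rw [hL]
        have h0 : sufF diffs times L (i + 1) = 0 := by rw [sufF, if_neg (by omega)]
        rw [h0]
        exact (decide_eq_true (by omega : tot + (incF diffs times L i + 0) ≤ limit)).symm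

-- ---- suffix sum in closed form ----

theorem range_map_getD_sum (xs : List Int) :
    ∀ n s, s + n ≤ xs.length →
      ((List.range' s n).map (fun j => xs.getD j 0)).sum = ((xs.drop s).take n).sum := by
  intro n
  induction n with
  | zero => simp
  | succ m ih =>
    intro s hs
    rw [List.range'_succ]
    have hd : xs.drop s = xs[s] :: xs.drop (s + 1) := by
      rw [List.drop_eq_getElem_cons (by omega)]
    rw [hd]
    simp only [List.map_cons, List.sum_cons, List.take_succ_cons, List.sum_cons]
    rw [ih (s + 1) (by omega)]
    have : xs.getD s 0 = xs[s] := by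
      rw [List.getD_eq_getElem?_getD, List.getElem?_eq_getElem (by omega)]; rfl
    omega

theorem sufF_range' (diffs times : List Int) (L : Int) :
    ∀ m i, i + m = diffs.length → 1 ≤ i →
      sufF diffs times L i
        = ((List.range' i m).map (tG times)).sum
          + hSum ((List.range' i m).map (fun j => (diffs.getD j 0, tG times j + tG times (j - 1)))) L := by
  intro m
  induction m with
  | zero =>
    intro i hi _
    rw [sufF, if_neg (by omega)]
    simp [hSum_nil]
  | succ m ih =>
    intro i hi h1
    have hilt : i < diffs.length := by omega
    rw [sufF, if_pos hilt, ih (i + 1) (by omega) (by omega), List.range'_succ]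
    simp only [List.map_cons, List.sum_cons, hSum_cons]
    have hinc : incF diffs times L i = tG times i + max (diffs.getD i 0 - L) 0 * (tG times i + tG times (i - 1)) := by
      unfold incF
      split
      · rename_i h
        have : max (diffs.getD i 0 - L) 0 = 0 := by omega
        rw [this]; ring
      · rename_i h
        rw [if_neg (by omega)]
        have : max (diffs.getD i 0 - L) 0 = diffs.getD i 0 - L := by omega
        rw [this]; ring
    rw [hinc]; ring

theorem pairsRaw_eq (diffs times : List Int) :
    pairsRaw diffs times
      = (List.range' 1 (diffs.length - 1)).map
          (fun j => (diffs.getD j 0, tG times j + tG times (j - 1))) := by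
  unfold pairsRaw
  rw [PySem.List.pyRange_one]
  have hn : ((diffs.length : Int) - 1).toNat = diffs.length - 1 := by omega
  rw [hn, List.range'_eq_map_range, List.map_map, List.map_map]
  apply List.map_congr_left
  intro k _
  have e1 : (1 : Int) + (k : Int) = ((1 + k : Nat) : Int) := by push_cast; ring
  have e3 : ((1 + k : Nat) : Int) - 1 = ((k : Nat) : Int) := by push_cast; ring
  have e4 : 1 + k - 1 = k := by omega
  simp only [Function.comp, e1, e3, pyGetD_eq_getD, tG, e4]

theorem sufF_zero_eq (diffs times : List Int) (L : Int) (hne : diffs ≠ [])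
    (hlen : diffs.length ≤ times.length) :
    sufF diffs times L 0 = (times.take diffs.length).sum + hSum (pairsRaw diffs times) L := by
  have hn : 0 < diffs.length := List.length_pos_of_ne_nil hne
  rw [sufF, if_pos hn, sufF_range' diffs times L (diffs.length - 1) 1 (by omega) (le_refl 1)]
  have hinc0 : incF diffs times L 0 = tG times 0 := by
    unfold incF; split <;> simp
  have hT : tG times 0 + ((List.range' 1 (diffs.length - 1)).map (tG times)).sum
      = (times.take diffs.length).sum := by
    have h0 : ((List.range' 0 diffs.length).map (fun j => times.getD j 0)).sum
        = ((times.drop 0).take diffs.length).sum := range_map_getD_sum times diffs.length 0 (by omega)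
    have hsplit : List.range' 0 diffs.length = 0 :: List.range' 1 (diffs.length - 1) := by
      have h : diffs.length = (diffs.length - 1) + 1 := by omega
      conv_lhs => rw [h]
      rw [List.range'_succ]
    rw [hsplit] at h0
    simp only [List.map_cons, List.sum_cons, List.drop_zero] at h0
    unfold tG
    omega
  rw [hinc0, pairsRaw_eq]
  omega

-- ---- absorb / walk characterisation ----

theorem absorbGo_fst_lt (pairs : List (Int × Int)) (cur : Int) :
    ∀ fuel k slope, pairs.length ≤ k + fuel →
      ∀ h : (absorbGo pairs cur fuel k slope).1 < pairs.length,
        pairs[(absorbGo pairs cur fuel k slope).1].1 < cur := by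
  intro fuel
  induction fuel with
  | zero =>
    intro k slope hb h
    simp only [absorbGo] at h
    omega
  | succ fuel ih =>
    intro k slope hb
    simp only [absorbGo]
    split
    · rename_i hk
      split
      · rename_i hcur
        exact ih (k + 1) (slope + pairs[k].2) (by omega)
      · rename_i hcur
        intro _
        exact lt_of_not_ge hcur
    · rename_i hk
      intro h
      exact absurd h hk

theorem absorbGo_spec (ps : List (Int × Int)) (cur : Int) :
    ∀ fuel k slope, ps.length ≤ k + fuel →
      (∀ p ∈ ps.take k, cur ≤ p.1) → slope = ((ps.take k).map (·.2)).sum →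
      (∀ p ∈ ps.take (absorbGo ps cur fuel k slope).1, cur ≤ p.1)
        ∧ (absorbGo ps cur fuel k slope).2 = ((ps.take (absorbGo ps cur fuel k slope).1).map (·.2)).sum := by
  intro fuel
  induction fuel with
  | zero =>
    intro k slope hb h1 h2
    simp only [absorbGo]
    exact ⟨h1, h2⟩
  | succ fuel ih =>
    intro k slope hb h1 h2
    simp only [absorbGo]
    split
    · rename_i hk
      split
      · rename_i hcur
        have htk : ps.take (k + 1) = ps.take k ++ [ps[k]] := by
          rw [List.take_add_one, List.getElem?_eq_getElem hk]
          rfl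
        apply ih (k + 1) (slope + ps[k].2) (by omega)
        · intro p hp
          rw [htk] at hp
          rcases List.mem_append.mp hp with hp | hp
          · exact h1 p hp
          · simp at hp
            rw [hp]; exact hcur
        · rw [htk, List.map_append, List.sum_append, ← h2]
          simp
      · exact ⟨h1, h2⟩
    · exact ⟨h1, h2⟩

theorem walk_seg (ps : List (Int × Int)) (hw : ∀ p ∈ ps, 0 ≤ p.2)
    (hsort : ps.Pairwise (fun a b => b.1 ≤ a.1)) (cur slope : Int) (k : Nat) (h1 : 1 < cur)
    (htake : ∀ p ∈ ps.take k, cur ≤ p.1) (hslope : slope = ((ps.take k).map (·.2)).sum) :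
    (∀ p ∈ ps.take (absorbGo ps cur (ps.length - k) k slope).1, cur ≤ p.1) ∧
    0 ≤ (absorbGo ps cur (ps.length - k) k slope).2 ∧
    1 ≤ (if h2 : (absorbGo ps cur (ps.length - k) k slope).1 < ps.length then (if 1 < ps[(absorbGo ps cur (ps.length - k) k slope).1].1 then ps[(absorbGo ps cur (ps.length - k) k slope).1].1 else 1) else 1) ∧
    (if h2 : (absorbGo ps cur (ps.length - k) k slope).1 < ps.length then (if 1 < ps[(absorbGo ps cur (ps.length - k) k slope).1].1 then ps[(absorbGo ps cur (ps.length - k) k slope).1].1 else 1) else 1) < cur ∧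
    (∀ L, (if h2 : (absorbGo ps cur (ps.length - k) k slope).1 < ps.length then (if 1 < ps[(absorbGo ps cur (ps.length - k) k slope).1].1 then ps[(absorbGo ps cur (ps.length - k) k slope).1].1 else 1) else 1) ≤ L → L ≤ cur →
      hSum ps L = hSum ps cur + (cur - L) * (absorbGo ps cur (ps.length - k) k slope).2) ∧
    (∀ p ∈ ps.take (absorbGo ps cur (ps.length - k) k slope).1, (if h2 : (absorbGo ps cur (ps.length - k) k slope).1 < ps.length then (if 1 < ps[(absorbGo ps cur (ps.length - k) k slope).1].1 then ps[(absorbGo ps cur (ps.length - k) k slope).1].1 else 1) else 1) ≤ p.1) ∧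
    (absorbGo ps cur (ps.length - k) k slope).2 = ((ps.take (absorbGo ps cur (ps.length - k) k slope).1).map (·.2)).sum := by
  obtain ⟨htake', hslope'⟩ := absorbGo_spec ps cur (ps.length - k) k slope (by omega) htake hslope
  set A := absorbGo ps cur (ps.length - k) k slope with hA
  set nxt := (if h2 : A.1 < ps.length then (if 1 < ps[A.1].1 then ps[A.1].1 else 1) else 1) with hnxt
  have hs0 : 0 ≤ A.2 := by
    rw [hslope']
    apply List.sum_nonneg
    intro x hx
    rcases List.mem_map.mp hx with ⟨p, hp, rfl⟩
    exact hw p (List.mem_of_mem_take hp)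
  have hblt : ∀ h : A.1 < ps.length, ps[A.1].1 < cur :=
    absorbGo_fst_lt ps cur (ps.length - k) k slope (by omega)
  have hnxt1 : 1 ≤ nxt := by
    rw [hnxt]
    split
    · split <;> omega
    · omega
  have hnxtcur : nxt < cur := by
    rw [hnxt]
    split
    · rename_i h2
      have := hblt h2
      split <;> omega
    · omega
  have hdrop : ∀ p ∈ ps.drop A.1, p.1 ≤ nxt ∧ p.1 < cur := by
    by_cases h2 : A.1 < ps.length
    · have hdd : ps.drop A.1 = ps[A.1] :: ps.drop (A.1 + 1) := List.drop_eq_getElem_cons h2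
      have hpw := hsort.sublist (List.drop_sublist A.1 ps)
      rw [hdd, List.pairwise_cons] at hpw
      have hble : ps[A.1].1 ≤ nxt := by
        rw [hnxt, dif_pos h2]
        split <;> omega
      intro p hp
      rw [hdd] at hp
      rcases List.mem_cons.mp hp with rfl | hp
      · exact ⟨hble, hblt h2⟩
      · have hle := hpw.1 p hp
        exact ⟨le_trans hle hble, lt_of_le_of_lt hle (hblt h2)⟩
    · intro p hp
      rw [List.drop_eq_nil_of_le (by omega)] at hp
      cases hp
  have hseg : ∀ L, nxt ≤ L → L ≤ cur → hSum ps L = hSum ps cur + (cur - L) * A.2 := by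
    intro L hL1 hL2
    conv_lhs => rw [← List.take_append_drop A.1 ps]
    conv_rhs => rw [← List.take_append_drop A.1 ps]
    rw [hSum_append, hSum_append]
    rw [hSum_shift htake' hL2]
    rw [hSum_eq_zero (fun p hp => le_trans (hdrop p hp).1 hL1)]
    rw [hSum_eq_zero (fun p hp => le_of_lt (hdrop p hp).2)]
    rw [hslope']
    ring
  exact ⟨htake', hs0, hnxt1, hnxtcur, hseg,
    fun p hp => le_of_lt (lt_of_lt_of_le hnxtcur (htake' p hp)), hslope'⟩

theorem walkGo_char (ps : List (Int × Int)) (limit : Int)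
    (hw : ∀ p ∈ ps, 0 ≤ p.2) (hsort : ps.Pairwise (fun a b => b.1 ≤ a.1)) (base : Int) :
    ∀ fuel cur total slope k, (cur - 1).toNat ≤ fuel → 1 ≤ cur → total = base + hSum ps cur → total ≤ limit →
      (∀ p ∈ ps.take k, cur ≤ p.1) → slope = ((ps.take k).map (·.2)).sum →
      1 ≤ walkGo ps limit fuel cur total slope k ∧ walkGo ps limit fuel cur total slope k ≤ cur ∧
      base + hSum ps (walkGo ps limit fuel cur total slope k) ≤ limit ∧
      (walkGo ps limit fuel cur total slope k = 1 ∨ limit < base + hSum ps (walkGo ps limit fuel cur total slope k - 1)) := by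
  intro fuel
  induction fuel with
  | zero =>
    intro cur total slope k hN h1c htot hlim htake hslope
    have hcur1 : cur = 1 := by omega
    subst hcur1
    simp only [walkGo]
    exact ⟨le_rfl, le_rfl, by rw [← htot]; exact hlim, Or.inl (by simp)⟩
  | succ N ihN =>
    intro cur total slope k hN h1c htot hlim htake hslope
    simp only [walkGo]
    by_cases h1 : 1 < cur
    · rw [if_pos h1]
      obtain ⟨htake', hs0, hnxt1, hnxtcur, hseg, htake2, hslope'⟩ :=
        walk_seg ps hw hsort cur slope k h1 htake hslope
      set A := absorbGo ps cur (ps.length - k) k slope with hA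
      set nxt := (if h2 : A.1 < ps.length then (if 1 < ps[A.1].1 then ps[A.1].1 else 1) else 1) with hnxt
      by_cases hgd : 0 < A.2 ∧ nxt < cur - PySem.Int.floordiv (limit - total) A.2
      · rw [if_pos hgd]
        obtain ⟨hsp, hnt⟩ := hgd
        set fd := PySem.Int.floordiv (limit - total) A.2 with hfdd
        have hfd := PySem.Int.floordiv_mul_add_mod (limit - total) A.2
        have hm0 : 0 ≤ PySem.Int.mod (limit - total) A.2 := PySem.Int.mod_nonneg _ hsp
        have hmlt : PySem.Int.mod (limit - total) A.2 < A.2 := PySem.Int.mod_lt _ hsp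
        have hfd0 : 0 ≤ fd := by
          by_contra hcon
          push_neg at hcon
          have : fd * A.2 ≤ -1 * A.2 := mul_le_mul_of_nonneg_right (by omega) (by omega)
          linarith
        refine ⟨by omega, by omega, ?_, ?_⟩
        · rw [hseg (cur - fd) (by omega) (by omega)]
          have he : cur - (cur - fd) = fd := by ring
          rw [he]
          linarith
        · right
          rw [hseg (cur - fd - 1) (by omega) (by omega)]
          have he : cur - (cur - fd - 1) = fd + 1 := by ring
          rw [he]
          have hexp : (fd + 1) * A.2 = fd * A.2 + A.2 := by ring
          linarith
      · rw [if_neg hgd]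
        have htot2 : total + (cur - nxt) * A.2 = base + hSum ps nxt := by
          rw [hseg nxt le_rfl (le_of_lt hnxtcur), htot]
          ring
        have hlim2 : total + (cur - nxt) * A.2 ≤ limit := by
          by_cases hsp : 0 < A.2
          · have hnt : cur - PySem.Int.floordiv (limit - total) A.2 ≤ nxt := by
              rcases not_and_or.mp hgd with h | h
              · omega
              · omega
            have hfd := PySem.Int.floordiv_mul_add_mod (limit - total) A.2
            have hm0 : 0 ≤ PySem.Int.mod (limit - total) A.2 := PySem.Int.mod_nonneg _ hsp
            have hmul : (cur - nxt) * A.2 ≤ PySem.Int.floordiv (limit - total) A.2 * A.2 :=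
              mul_le_mul_of_nonneg_right (by omega) (le_of_lt hsp)
            linarith
          · have h0 : A.2 = 0 := by omega
            rw [h0, mul_zero, add_zero]
            exact hlim
        obtain ⟨r1, r2, r3, r4⟩ :=
          ihN nxt (total + (cur - nxt) * A.2) A.2 A.1 (by omega) (by omega) htot2 hlim2 htake2 hslope'
        exact ⟨r1, by omega, r3, r4⟩
    · have hcur1 : cur = 1 := by omega
      subst hcur1
      rw [if_neg (by omega)]
      exact ⟨le_rfl, le_rfl, by rw [← htot]; exact hlim, Or.inl (by simp)⟩

-- ---- binary-search characterisation ----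

theorem bsearch_const (diffs times : List Int) (limit r0 : Int)
    (hall : ∀ x, x ≤ r0 → canClearGo diffs times limit x diffs.length 0 0 0 = false) :
    ∀ fuel left right answer, right ≤ r0 →
      bsearchGo diffs times limit fuel left right answer = answer := by
  intro fuel
  induction fuel with
  | zero => intro l r ans _; rfl
  | succ fuel ih =>
    intro l r ans hr
    simp only [bsearchGo]
    by_cases hlr : l ≤ r
    · rw [if_pos hlr]
      have hmid := PySem.Int.floordiv_two_mid_bounds hlr
      have hfalse := hall (PySem.Int.floordiv (l + r) 2) (by omega)
      rw [hfalse]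
      simp only [Bool.false_eq_true, if_false]
      exact ih (PySem.Int.floordiv (l + r) 2 + 1) r ans hr
    · rw [if_neg hlr]

theorem bsearch_char (diffs times : List Int) (limit m : Int)
    (hmono : ∀ x y : Int, x ≤ y → canClearGo diffs times limit x diffs.length 0 0 0 = true →
      canClearGo diffs times limit y diffs.length 0 0 0 = true) :
    ∀ fuel left right answer, (right + 1 - left).toNat ≤ fuel →
      (∀ x, 1 ≤ x → x < left → canClearGo diffs times limit x diffs.length 0 0 0 = false) →
      canClearGo diffs times limit answer diffs.length 0 0 0 = true →
      answer ≤ right + 1 → 1 ≤ left → 1 ≤ answer → answer ≤ m → right ≤ m →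
      (canClearGo diffs times limit (bsearchGo diffs times limit fuel left right answer) diffs.length 0 0 0 = true
        ∧ 1 ≤ bsearchGo diffs times limit fuel left right answer
        ∧ bsearchGo diffs times limit fuel left right answer ≤ m
        ∧ (bsearchGo diffs times limit fuel left right answer = 1
            ∨ canClearGo diffs times limit (bsearchGo diffs times limit fuel left right answer - 1) diffs.length 0 0 0 = false)) := by
  intro fuel
  induction fuel with
  | zero =>
    intro l r ans hf hbelow hans hansr hl hans1 hansm hrm
    simp only [bsearchGo]
    refine ⟨hans, hans1, hansm, ?_⟩
    by_cases h1 : ans = 1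
    · exact Or.inl h1
    · exact Or.inr (hbelow (ans - 1) (by omega) (by omega))
  | succ fuel ih =>
    intro l r ans hf hbelow hans hansr hl hans1 hansm hrm
    simp only [bsearchGo]
    by_cases hlr : l ≤ r
    · rw [if_pos hlr]
      have hmid := PySem.Int.floordiv_two_mid_bounds hlr
      by_cases hcan : canClearGo diffs times limit (PySem.Int.floordiv (l + r) 2) diffs.length 0 0 0 = true
      · rw [if_pos hcan]
        exact ih l (PySem.Int.floordiv (l + r) 2 - 1) (PySem.Int.floordiv (l + r) 2)
          (by omega) hbelow hcan (by omega) hl (by omega) (by omega) (by omega)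
      · rw [if_neg hcan]
        apply ih (PySem.Int.floordiv (l + r) 2 + 1) r ans (by omega)
        · intro x hx1 hxlt
          by_cases hxl : x < l
          · exact hbelow x hx1 hxl
          · cases hPx : canClearGo diffs times limit x diffs.length 0 0 0
            · rfl
            · exact absurd (hmono x (PySem.Int.floordiv (l + r) 2) (by omega) hPx) hcan
        · exact hans
        · omega
        · omega
        · omega
        · omega
        · omega
    · rw [if_neg hlr]
      refine ⟨hans, hans1, hansm, ?_⟩
      by_cases h1 : ans = 1
      · exact Or.inl h1
      · exact Or.inr (hbelow (ans - 1) (by omega) (by omega))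

-- uniqueness of the threshold for an antitone cost
theorem threshold_unique {g : Int → Int} {limit r1 r2 : Int}
    (hmono : ∀ x y : Int, x ≤ y → g y ≤ g x)
    (h1 : 1 ≤ r1) (h1f : g r1 ≤ limit) (h1b : r1 = 1 ∨ limit < g (r1 - 1))
    (h2 : 1 ≤ r2) (h2f : g r2 ≤ limit) (h2b : r2 = 1 ∨ limit < g (r2 - 1)) :
    r1 = r2 := by
  rcases lt_trichotomy r1 r2 with h | h | h
  · rcases h2b with h2b | h2b
    · omega
    · have := hmono r1 (r2 - 1) (by omega)
      omega
  · exact h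
  · rcases h1b with h1b | h1b
    · omega
    · have := hmono r2 (r1 - 1) (by omega)
      omega

-- ===== VERDICT (by name: the statement is the Claim_ definition above) =====
theorem solution_spec : Claim_equal_solution := by
  unfold Claim_equal_solution
  intro diffs times limit _hdom hpre
  unfold Spec_solution
  obtain ⟨hne, hlen, ht⟩ := hpre
  obtain ⟨m, hm⟩ : ∃ m, PySem.List.max? diffs (fun x => x) = some m := by
    cases hmax : PySem.List.max? diffs (fun x => x) with
    | none => exact absurd ((PySem.List.max?_eq_none_iff _ _).mp hmax) hne
    | some m => exact ⟨m, rfl⟩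
  have hmmax : ∀ y ∈ diffs, y ≤ m := by
    have := PySem.List.max?_isMax hm
    simpa using this
  have hn1 : 0 < diffs.length := List.length_pos_of_ne_nil hne
  have htg := tG_nonneg hlen ht
  have hraww : ∀ p ∈ pairsRaw diffs times, 0 ≤ p.2 := by
    rw [pairsRaw_eq]
    intro p hp
    rcases List.mem_map.mp hp with ⟨j, hj, rfl⟩
    have hjr := List.mem_range'_1.mp hj
    have h1 := htg j (by omega)
    have h2 := htg (j - 1) (by omega)
    show 0 ≤ tG times j + tG times (j - 1)
    omega
  have hrawb : ∀ p ∈ pairsRaw diffs times, p.1 ≤ m := by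
    rw [pairsRaw_eq]
    intro p hp
    rcases List.mem_map.mp hp with ⟨j, hj, rfl⟩
    have hjr := List.mem_range'_1.mp hj
    show diffs.getD j 0 ≤ m
    have hjlt : j < diffs.length := by omega
    have hg : diffs.getD j 0 = diffs[j] := by
      rw [List.getD_eq_getElem?_getD, List.getElem?_eq_getElem hjlt]
      rfl
    rw [hg]
    exact hmmax _ (List.getElem_mem hjlt)
  have hP : ∀ L, canClearGo diffs times limit L diffs.length 0 0 0
      = decide ((times.take diffs.length).sum + hSum (pairsRaw diffs times) L ≤ limit) := by
    intro L
    rw [canClear_eq hlen ht diffs.length 0 0 0 (by omega) hn1 (by simp),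
      sufF_zero_eq diffs times L hne hlen]
    simp only [zero_add]
  have hgmono : ∀ x y : Int, x ≤ y →
      (times.take diffs.length).sum + hSum (pairsRaw diffs times) y
        ≤ (times.take diffs.length).sum + hSum (pairsRaw diffs times) x := by
    intro x y h
    have := hSum_antitone hraww h
    omega
  have hraw0 : hSum (pairsRaw diffs times) m = 0 := hSum_eq_zero hrawb
  unfold solution solution_alt
  rw [hm]
  simp only [Option.getD_some]
  rw [PySem.List.slice_to_natCast]
  by_cases hM1 : m < 1
  · rw [if_pos (Or.inl hM1), show m.toNat = 0 from by omega]
    rfl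
  · by_cases hTl : limit < (times.take diffs.length).sum
    · rw [if_pos (Or.inr hTl)]
      apply bsearch_const diffs times limit m _ m.toNat 1 m m le_rfl
      intro x hx
      rw [hP x]
      have := hgmono x m hx
      simp only [decide_eq_false_iff_not]
      omega
    · have hmono' : ∀ x y : Int, x ≤ y → canClearGo diffs times limit x diffs.length 0 0 0 = true →
          canClearGo diffs times limit y diffs.length 0 0 0 = true := by
        intro x y h hx
        rw [hP] at hx ⊢
        simp only [decide_eq_true_eq] at hx ⊢
        have := hgmono x y h
        omega
      have hPm : canClearGo diffs times limit m diffs.length 0 0 0 = true := by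
        rw [hP]
        simp only [decide_eq_true_eq, hraw0]
        omega
      obtain ⟨a1, a2, a3, a4⟩ := bsearch_char diffs times limit m hmono' m.toNat 1 m m
        (by omega) (by intro x h1 h2; omega) hPm (by omega) le_rfl (by omega) le_rfl le_rfl
      set ps := PySem.List.sorted (pairsRaw diffs times) (fun p => p.1) true with hps
      have hperm : ps.Perm (pairsRaw diffs times) := PySem.List.sorted_perm _ _ _
      have hpsw : ∀ p ∈ ps, 0 ≤ p.2 := fun p hp => hraww p (hperm.mem_iff.mp hp)
      have hpsb : ∀ p ∈ ps, p.1 ≤ m := fun p hp => hrawb p (hperm.mem_iff.mp hp)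
      have hsortps : ps.Pairwise (fun a b => b.1 ≤ a.1) := PySem.List.sorted_pairwise_rev _ _
      have hps0 : hSum ps m = 0 := hSum_eq_zero hpsb
      obtain ⟨b1, b2, b3, b4⟩ := walkGo_char ps limit hpsw hsortps
        ((times.take diffs.length).sum) (m - 1).toNat m ((times.take diffs.length).sum) 0 0
        le_rfl (by omega) (by rw [hps0]; ring) (by omega) (by simp) (by simp)
      rw [if_neg (by push_neg; exact ⟨by omega, by omega⟩)]
      have hpermSum : ∀ L : Int, hSum ps L = hSum (pairsRaw diffs times) L :=
        fun L => hSum_perm hperm L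
      rw [hP] at a1 a4
      simp only [decide_eq_true_eq] at a1
      have a4' : bsearchGo diffs times limit m.toNat 1 m m = 1 ∨
          limit < (times.take diffs.length).sum
            + hSum (pairsRaw diffs times) (bsearchGo diffs times limit m.toNat 1 m m - 1) := by
        rcases a4 with h | h
        · exact Or.inl h
        · simp only [decide_eq_false_iff_not] at h
          omega
      rw [hpermSum] at b3 b4
      exact threshold_unique
        (g := fun L => (times.take diffs.length).sum + hSum (pairsRaw diffs times) L)
        hgmono a2 a1 a4' b1 b3 b4
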